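-- pv_equiv track=rewrite | github.com/arc25275/CS325 | FeedDog.py | feedDog
-- ===== SOURCE A (Python) =====
-- def feedDog(hunger_level, biscuit_size):
--     dog_count = 0
--     biscuit_size.sort()  # Sort biscuit sizes in ascending order
--     for hunger in hunger_level:
--         for i, size in enumerate(biscuit_size):
--             if size >= hunger:
--                 del biscuit_size[i]  # Remove the used biscuit from the list
--                 dog_count += 1
--                 break
--     return dog_count
-- ===== SOURCE B (Python) =====
-- def feedDog(hunger_level, biscuit_size):
--     # Binary search (bisect_left) for the smallest remaining biscuit >= hunger,
--     # instead of A's linear scan over the sorted list for every dog.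
--     biscuit_size.sort()
--     count = 0
--     for hunger in hunger_level:
--         lo, hi = 0, len(biscuit_size)
--         while lo < hi:
--             mid = (lo + hi) // 2
--             if biscuit_size[mid] < hunger:
--                 lo = mid + 1
--             else:
--                 hi = mid
--         if lo < len(biscuit_size):
--             del biscuit_size[lo]
--             count += 1
--     return count
-- ===== Notes on version B (the rewrite author's own statement) =====
-- stated objective: faster
-- what changed: A scans the sorted biscuit list linearly for each dog; B locates the smallest sufficient biscuit with a hand-written binary search (bisect_left loop), so comparisons drop from O(m*n) to O(m log n) while deletion stays a C-level memmove.
import Mathlib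
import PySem

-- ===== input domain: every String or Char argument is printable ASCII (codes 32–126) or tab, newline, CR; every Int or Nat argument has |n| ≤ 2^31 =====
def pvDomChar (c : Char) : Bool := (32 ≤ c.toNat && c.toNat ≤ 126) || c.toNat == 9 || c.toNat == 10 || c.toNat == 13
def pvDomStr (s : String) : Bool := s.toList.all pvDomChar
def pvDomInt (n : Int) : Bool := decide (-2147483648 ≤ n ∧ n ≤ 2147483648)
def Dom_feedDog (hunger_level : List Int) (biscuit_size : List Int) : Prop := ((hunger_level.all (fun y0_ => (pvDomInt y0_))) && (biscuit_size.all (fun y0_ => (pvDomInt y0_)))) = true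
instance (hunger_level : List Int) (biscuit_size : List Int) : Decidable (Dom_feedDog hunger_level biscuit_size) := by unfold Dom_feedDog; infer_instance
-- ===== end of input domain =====

-- B replaces A's per-dog linear scan of the sorted biscuit list with a binary search (bisect_left loop);
-- both A and B mutate biscuit_size in place (sort + del): the equivalence proved here is about the return value.

-- ===== PORT A =====
-- inner 'for i, size in enumerate(biscuit_size): if size >= hunger: … break' — first index with size ≥ hunger
def pyFindGE (h : Int) : List Int → Nat → Option Nat
  | [], _ => none
  | x :: xs, i => if h ≤ x then some i else pyFindGE h xs (i + 1)

def feedDogStep (st : List Int × Int) (h : Int) : List Int × Int :=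
  match pyFindGE h st.1 0 with
  | some i => (st.1.eraseIdx i, st.2 + 1)
  | none => st

def feedDog (hunger_level : List Int) (biscuit_size : List Int) : Int :=
  (hunger_level.foldl feedDogStep (PySem.List.sorted biscuit_size (fun x => x) false, 0)).2

-- ===== PORT B =====
-- Source B's hand-written lo/hi loop is exactly bisect_left; PySem.List.bisectLeft is that same lo/hi loop (exact)
def feedDogAltStep (st : List Int × Int) (h : Int) : List Int × Int :=
  let pos := PySem.List.bisectLeft st.1 h
  if pos < st.1.length then (st.1.eraseIdx pos, st.2 + 1) else st

def feedDog_alt (hunger_level : List Int) (biscuit_size : List Int) : Int :=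
  (hunger_level.foldl feedDogAltStep (PySem.List.sorted biscuit_size (fun x => x) false, 0)).2

-- ===== PRECONDITION & SPEC =====
def Spec_feedDog (hunger_level : List Int) (biscuit_size : List Int) (out : Int) : Prop := out = feedDog_alt hunger_level biscuit_size
instance (hunger_level : List Int) (biscuit_size : List Int) (out : Int) : Decidable (Spec_feedDog hunger_level biscuit_size out) := by unfold Spec_feedDog; infer_instance

-- ===== CLAIM (what is proved, stated in full; the proofs are below) =====
def Claim_equal_feedDog : Prop := ∀ (hunger_level : List Int) (biscuit_size : List Int), Dom_feedDog hunger_level biscuit_size → Spec_feedDog hunger_level biscuit_size (feedDog hunger_level biscuit_size)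

-- ===== LEMMAS AND PROOFS =====

-- A's linear scan, characterised by any split point p: everything before p is < h, everything from p on is ≥ h
theorem pyFindGE_char (h : Int) : ∀ (l : List Int) (i p : Nat), p ≤ l.length →
    (∀ j (_ : j < l.length), j < p → l[j] < h) →
    (∀ j (_ : j < l.length), p ≤ j → h ≤ l[j]) →
    pyFindGE h l i = if p < l.length then some (i + p) else none := by
  intro l
  induction l with
  | nil => intro i p hp _ _; simp at hp; simp [pyFindGE, hp]
  | cons x xs ih =>
    intro i p hp hlt hge
    cases p with
    | zero =>
      have hx : h ≤ x := hge 0 (by simp) (Nat.zero_le _)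
      simp [pyFindGE, hx]
    | succ q =>
      have hx : x < h := hlt 0 (by simp) (Nat.succ_pos _)
      have hrec := ih (i + 1) q (by simpa using hp)
        (fun j hj hjq => by simpa using hlt (j + 1) (by simpa using hj) (by omega))
        (fun j hj hqj => by simpa using hge (j + 1) (by simpa using hj) (by omega))
      simp only [pyFindGE, if_neg (not_le.mpr hx), hrec, List.length_cons]
      by_cases hc : q < xs.length
      · rw [if_pos hc, if_pos (by omega)]; congr 1; omega
      · rw [if_neg hc, if_neg (by omega)]

theorem step_eq (l : List Int) (c : Int) (h : Int) (hs : l.Pairwise (· ≤ ·)) :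
    feedDogStep (l, c) h = feedDogAltStep (l, c) h := by
  obtain ⟨h1, h2, h3⟩ := PySem.List.bisectLeft_spec l h hs
  have := pyFindGE_char h l 0 (PySem.List.bisectLeft l h) h1 h2 h3
  unfold feedDogStep feedDogAltStep
  simp only at this
  rw [this]
  by_cases hc : PySem.List.bisectLeft l h < l.length
  · rw [if_pos hc]; simp [hc]
  · rw [if_neg hc]; simp [hc]

theorem step_sorted (l : List Int) (c : Int) (h : Int) (hs : l.Pairwise (· ≤ ·)) :
    (feedDogAltStep (l, c) h).1.Pairwise (· ≤ ·) := by
  unfold feedDogAltStep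
  dsimp only
  split
  · exact hs.sublist (List.eraseIdx_sublist _ _)
  · exact hs

theorem fold_eq (hs : List Int) : ∀ (l : List Int) (c : Int), l.Pairwise (· ≤ ·) →
    hs.foldl feedDogStep (l, c) = hs.foldl feedDogAltStep (l, c) := by
  induction hs with
  | nil => intro l c _; rfl
  | cons h t ih =>
    intro l c hsort
    have h1 := step_eq l c h hsort
    have h2 := step_sorted l c h hsort
    simp only [List.foldl_cons, h1]
    have : feedDogAltStep (l, c) h = ((feedDogAltStep (l, c) h).1, (feedDogAltStep (l, c) h).2) := rfl
    rw [this] at h2 ⊢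
    exact ih _ _ h2

-- ===== VERDICT (by name: the statement is the Claim_ definition above) =====
theorem feedDog_spec : Claim_equal_feedDog := by
  intro hunger biscuit _
  unfold Spec_feedDog feedDog feedDog_alt
  rw [fold_eq hunger _ 0 (by simpa using PySem.List.sorted_pairwise biscuit (fun x => x))]
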